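-- pv_equiv track=rewrite | github.com/hendrixx-cnc/Orkestra | SCRIPTS/COMPRESSION/lib/cdis_detect_patterns.py | extract_token_sequences
-- ===== SOURCE A (Python) =====
-- from collections import defaultdict, Counter
--
-- def extract_token_sequences(tokens, min_length=2, max_length=10):
--     """
--     Extract all possible token sequences from the stream
--     Returns: {sequence_tuple: [positions]}
--     """
--     sequences = defaultdict(list)
--
--     for length in range(min_length, max_length + 1):
--         for i in range(len(tokens) - length + 1):
--             # Extract sequence of token IDs/types
--             sequence = []
--             for j in range(length):
--                 token = tokens[i + j]
--                 if token['type'] == 'literal':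
--                     # For literals, use the actual text
--                     sequence.append(('L', token['text']))
--                 else:
--                     # For dictionary tokens, use type and ID
--                     sequence.append((token['type'][0].upper(), token['id']))
--
--             seq_tuple = tuple(sequence)
--             sequences[seq_tuple].append(i)
--
--     return sequences
-- ===== SOURCE B (Python) =====
-- from collections import defaultdict
--
-- def extract_token_sequences(tokens, min_length=2, max_length=10):
--     """
--     Extract all possible token sequences from the stream
--     Returns: {sequence_tuple: [positions]}
--     """
--     sequences = defaultdict(list)
--     n = len(tokens)
--     if min_length > max_length or min_length > n:
--         # no window of any admissible length exists
--         return sequences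
--     # one representative pair per token, computed once
--     reps = [('L', t['text']) if t['type'] == 'literal' else (t['type'][0].upper(), t['id'])
--             for t in tokens]
--     # all windows of the minimal length, by slicing
--     windows = [tuple(reps[i:i + min_length]) for i in range(n - min_length + 1)]
--     for _ in range(min_length, max_length + 1):
--         for i, w in enumerate(windows):
--             sequences[w].append(i)
--         # extend each window (except the last) by its next token
--         windows = [w + (reps[i + len(w)],) for i, w in enumerate(windows[:-1])]
--     return sequences
-- ===== Notes on version B (the rewrite author's own statement) =====
-- stated objective: alternative
-- what changed: B replaces A's length-major triple loop that rebuilds every window element-by-element with a precomputed per-token representative list, initial windows obtained by slicing, and an incremental pass that extends each window by one token per length step; the inner element-rebuilding loop disappears.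
-- outside the precondition, e.g. on extract_token_sequences([{}], 0, 0): A returns {(): [0, 1]}, B raises KeyError
import Mathlib
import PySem

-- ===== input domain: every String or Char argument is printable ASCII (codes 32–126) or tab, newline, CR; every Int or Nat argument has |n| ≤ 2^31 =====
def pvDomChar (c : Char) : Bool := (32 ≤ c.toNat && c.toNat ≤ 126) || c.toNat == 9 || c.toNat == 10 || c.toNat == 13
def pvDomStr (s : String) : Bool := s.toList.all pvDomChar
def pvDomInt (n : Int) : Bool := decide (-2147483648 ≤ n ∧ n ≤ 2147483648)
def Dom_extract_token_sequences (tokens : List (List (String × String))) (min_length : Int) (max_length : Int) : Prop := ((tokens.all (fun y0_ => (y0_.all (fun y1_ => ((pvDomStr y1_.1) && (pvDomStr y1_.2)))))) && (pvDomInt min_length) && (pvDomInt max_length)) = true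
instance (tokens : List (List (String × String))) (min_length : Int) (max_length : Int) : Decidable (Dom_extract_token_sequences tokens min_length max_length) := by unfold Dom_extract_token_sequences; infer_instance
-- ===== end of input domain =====

-- B replaces A's length-major triple loop (each window tuple rebuilt element-by-element) by a
-- precomputed representative list, slice-built minimal windows, and one-token window extensions
-- per length step (objective: alternative; same values, same dict insertion order).

-- ===== PORT A =====
def extract_token_sequences (tokens : List (List (String × String))) (min_length : Int) (max_length : Int) : List (List (String × String) × List Int) :=
  ((PySem.List.pyRange min_length (max_length + 1) 1).foldl (fun seqs length =>
      (PySem.List.pyRange 0 (PySem.List.len tokens - length + 1) 1).foldl (fun seqs i =>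
        let sequence : List (String × String) :=
          (PySem.List.pyRange 0 length 1).foldl (fun s j =>
            let token := PySem.List.pyGetD tokens (i + j) []
            if PySem.Dict.getD (PySem.Dict.mk token) "type" "" = "literal" then
              s ++ [("L", PySem.Dict.getD (PySem.Dict.mk token) "text" "")]
            else
              s ++ [(PySem.Str.upper (String.ofList [((PySem.Str.pyGet? (PySem.Dict.getD (PySem.Dict.mk token) "type" "") 0).getD ' ')]),
                     PySem.Dict.getD (PySem.Dict.mk token) "id" "")]) []
        PySem.Dict.modify seqs sequence [] (fun v => v ++ [i])) seqs)
    (PySem.Dict.empty : PySem.Dict (List (String × String)) (List Int))).items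

-- ===== PORT B =====
-- the representative pair of one token (Source B's comprehension body)
def pvRep (token : List (String × String)) : String × String :=
  if PySem.Dict.getD (PySem.Dict.mk token) "type" "" = "literal" then
    ("L", PySem.Dict.getD (PySem.Dict.mk token) "text" "")
  else
    (PySem.Str.upper (String.ofList [((PySem.Str.pyGet? (PySem.Dict.getD (PySem.Dict.mk token) "type" "") 0).getD ' ')]),
     PySem.Dict.getD (PySem.Dict.mk token) "id" "")

def extract_token_sequences_alt (tokens : List (List (String × String))) (min_length : Int) (max_length : Int) : List (List (String × String) × List Int) :=
  let n := PySem.List.len tokens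
  if min_length > max_length ∨ min_length > n then
    (PySem.Dict.empty : PySem.Dict (List (String × String)) (List Int)).items
  else
  let reps := tokens.map pvRep
  let windows0 := (PySem.List.pyRange 0 (n - min_length + 1) 1).map
      (fun i => PySem.List.slice reps (some i) (some (i + min_length)))
  ((PySem.List.pyRange min_length (max_length + 1) 1).foldl
      (fun (st : PySem.Dict (List (String × String)) (List Int) × List (List (String × String))) _ =>
        let seqs := (PySem.List.enumerate st.2).foldl
            (fun d p => PySem.Dict.modify d p.2 [] (fun v => v ++ [p.1])) st.1
        let ws := (PySem.List.enumerate (PySem.List.slice st.2 none (some (-1)))).map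
            (fun p => p.2 ++ [PySem.List.pyGetD reps (p.1 + PySem.List.len p.2) ("", "")])
        (seqs, ws))
      ((PySem.Dict.empty : PySem.Dict (List (String × String)) (List Int)), windows0)).1.items

-- ===== PRECONDITION & SPEC =====
-- a token usable by both programs: it has a 'type', a literal has a 'text', a non-literal has a
-- non-empty type string and an 'id'
def pvWfTok (t : List (String × String)) : Bool :=
  match PySem.Dict.get? (PySem.Dict.mk t) "type" with
  | none => false
  | some ty => if ty = "literal" then PySem.Dict.contains (PySem.Dict.mk t) "text"
               else decide (ty ≠ "") && PySem.Dict.contains (PySem.Dict.mk t) "id"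

-- Pre_ excludes (a) negative min_length, outside the natural domain of a sequence length — there A's
-- empty-tuple key is an accident of range arithmetic and B's natural extension pass raises IndexError
-- whenever min_length ≤ max_length — and (b) when the length range is nonempty (min_length ≤
-- max_length and min_length ≤ len(tokens)), tokens missing the 'type'/'text'/'id' keys they need,
-- on which Python A raises KeyError/IndexError as soon as it builds a window touching them and B,
-- which then precomputes all representatives, always raises.
def Pre_extract_token_sequences (tokens : List (List (String × String))) (min_length : Int) (max_length : Int) : Prop :=
  0 ≤ min_length ∧
    (min_length ≤ max_length ∧ min_length ≤ PySem.List.len tokens → tokens.all pvWfTok = true)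

instance (tokens : List (List (String × String))) (min_length : Int) (max_length : Int) : Decidable (Pre_extract_token_sequences tokens min_length max_length) := by unfold Pre_extract_token_sequences; infer_instance

def pvWitness_extract_token_sequences : (List (List (String × String))) × Int × Int :=
  ([[("type", "literal"), ("text", "a")], [("type", "word"), ("id", "7")], [("type", "literal"), ("text", "a")]], 2, 3)

def Spec_extract_token_sequences (tokens : List (List (String × String))) (min_length : Int) (max_length : Int) (out : List (List (String × String) × List Int)) : Prop := out = extract_token_sequences_alt tokens min_length max_length
instance (tokens : List (List (String × String))) (min_length : Int) (max_length : Int) (out : List (List (String × String) × List Int)) : Decidable (Spec_extract_token_sequences tokens min_length max_length out) := by unfold Spec_extract_token_sequences; infer_instance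

-- ===== CLAIM (what is proved, stated in full; the proofs are below) =====
def Claim_equal_extract_token_sequences : Prop := ∀ (tokens : List (List (String × String))) (min_length : Int) (max_length : Int), Dom_extract_token_sequences tokens min_length max_length → Pre_extract_token_sequences tokens min_length max_length → Spec_extract_token_sequences tokens min_length max_length (extract_token_sequences tokens min_length max_length)

-- ===== LEMMAS AND PROOFS =====

-- the key of the window of length L starting at i, as A computes it element by element
def pvKey (tokens : List (List (String × String))) (L i : Int) : List (String × String) :=
  (PySem.List.pyRange 0 L 1).map (fun j => pvRep (PySem.List.pyGetD tokens (i + j) []))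

-- the list of all windows of length L (B's `windows` state before its iteration for L)
def pvW (tokens : List (List (String × String))) (L : Int) : List (List (String × String)) :=
  (PySem.List.pyRange 0 (PySem.List.len tokens - L + 1) 1).map (fun i => pvKey tokens L i)

-- the common flattened loop both ports reduce to
def pvA (tokens : List (List (String × String))) (a b : Int)
    (d : PySem.Dict (List (String × String)) (List Int)) : PySem.Dict (List (String × String)) (List Int) :=
  (PySem.List.pyRange a b 1).foldl (fun d L =>
    (PySem.List.pyRange 0 (PySem.List.len tokens - L + 1) 1).foldl
      (fun d i => PySem.Dict.modify d (pvKey tokens L i) [] (fun v => v ++ [i])) d) d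

theorem pvA_inner (tokens : List (List (String × String))) (L i : Int) :
    (PySem.List.pyRange 0 L 1).foldl (fun s j =>
        let token := PySem.List.pyGetD tokens (i + j) []
        if PySem.Dict.getD (PySem.Dict.mk token) "type" "" = "literal" then
          s ++ [("L", PySem.Dict.getD (PySem.Dict.mk token) "text" "")]
        else
          s ++ [(PySem.Str.upper (String.ofList [((PySem.Str.pyGet? (PySem.Dict.getD (PySem.Dict.mk token) "type" "") 0).getD ' ')]),
                 PySem.Dict.getD (PySem.Dict.mk token) "id" "")]) []
      = pvKey tokens L i := by
  have h : (fun (s : List (String × String)) (j : Int) =>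
        let token := PySem.List.pyGetD tokens (i + j) []
        if PySem.Dict.getD (PySem.Dict.mk token) "type" "" = "literal" then
          s ++ [("L", PySem.Dict.getD (PySem.Dict.mk token) "text" "")]
        else
          s ++ [(PySem.Str.upper (String.ofList [((PySem.Str.pyGet? (PySem.Dict.getD (PySem.Dict.mk token) "type" "") 0).getD ' ')]),
                 PySem.Dict.getD (PySem.Dict.mk token) "id" "")])
      = (fun s j => s ++ [pvRep (PySem.List.pyGetD tokens (i + j) [])]) := by
    funext s j
    show (if _ = _ then _ else _) = _
    rw [pvRep]
    split <;> rfl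
  rw [h, PySem.List.foldl_append_singleton_eq_map, pvKey]
  simp

theorem portA_eq_pvA (tokens : List (List (String × String))) (min_length max_length : Int) :
    extract_token_sequences tokens min_length max_length
      = (pvA tokens min_length (max_length + 1) PySem.Dict.empty).items := by
  unfold extract_token_sequences pvA
  congr 2
  funext seqs length
  congr 1
  funext seqs i
  simp only [pvA_inner]

theorem enumerate_map_pyRange {β : Type} (m : Int) (f : Int → β) :
    PySem.List.enumerate ((PySem.List.pyRange 0 m 1).map f)
      = (PySem.List.pyRange 0 m 1).map (fun j => (j, f j)) := by
  by_cases h : m ≤ 0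
  · rw [PySem.List.pyRange_one_eq_nil h]; rfl
  · rw [not_le] at h
    rw [PySem.List.enumerate_eq_map_pyRange _ (f 0)]
    have hlen : PySem.List.len ((PySem.List.pyRange 0 m 1).map f) = m := by
      simp [PySem.List.len_eq, PySem.List.length_pyRange_one]
      omega
    rw [hlen]
    apply List.map_congr_left
    intro j hj
    rw [PySem.List.mem_pyRange_one] at hj
    rw [PySem.List.pyGetD_map_pyRange_of_nonneg f m j (f 0) hj.1 hj.2]

theorem windows0_eq (tokens : List (List (String × String))) (minL : Int) (h : 0 ≤ minL) :
    (PySem.List.pyRange 0 (PySem.List.len tokens - minL + 1) 1).map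
        (fun i => PySem.List.slice (tokens.map pvRep) (some i) (some (i + minL)))
      = pvW tokens minL := by
  unfold pvW
  apply List.map_congr_left
  intro i hi
  rw [PySem.List.mem_pyRange_one] at hi
  have hn : PySem.List.len tokens = (tokens.length : Int) := PySem.List.len_eq tokens
  have h0i : (0:Int) ≤ i := hi.1
  have hiub : i + minL ≤ (tokens.length : Int) := by rw [← hn]; omega
  rw [PySem.List.slice_toNat _ h0i (by omega)]
  have hc : (i + minL).toNat - i.toNat = minL.toNat := by omega
  rw [hc]
  apply List.ext_getElem
  · simp [pvKey, PySem.List.length_pyRange_one]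
    omega
  · intro k hk1 hk2
    have hkL : k < minL.toNat := by
      simpa [pvKey, PySem.List.length_pyRange_one] using hk2
    simp only [pvKey, List.getElem_map, List.getElem_take, List.getElem_drop]
    rw [PySem.List.getElem_pyRange_one]
    rw [PySem.List.pyGetD_eq_getElem tokens [] (by omega) (by omega)]
    congr 2
    omega

theorem extension_eq (tokens : List (List (String × String))) (L : Int) (h : 0 ≤ L) :
    (PySem.List.enumerate (PySem.List.slice (pvW tokens L) none (some (-1)))).map
        (fun p => p.2 ++ [PySem.List.pyGetD (tokens.map pvRep) (p.1 + PySem.List.len p.2) ("", "")])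
      = pvW tokens (L + 1) := by
  have hn : PySem.List.len tokens = (tokens.length : Int) := PySem.List.len_eq tokens
  have h1 : (PySem.List.slice (pvW tokens L) none (some (-1)))
      = (PySem.List.pyRange 0 (PySem.List.len tokens - L) 1).map (fun i => pvKey tokens L i) := by
    rw [PySem.List.slice_to_neg_one]
    by_cases hb : 0 ≤ PySem.List.len tokens - L
    · unfold pvW
      rw [PySem.List.pyRange_one_succ_right hb, List.map_append]
      simp
    · rw [not_le] at hb
      unfold pvW
      rw [PySem.List.pyRange_one_eq_nil (by omega), PySem.List.pyRange_one_eq_nil (by omega)]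
      rfl
  rw [h1, enumerate_map_pyRange, List.map_map]
  unfold pvW
  rw [show PySem.List.len tokens - (L + 1) + 1 = PySem.List.len tokens - L by ring]
  apply List.map_congr_left
  intro i hi
  rw [PySem.List.mem_pyRange_one] at hi
  have hiub : i + L < (tokens.length : Int) := by rw [← hn]; omega
  have hlenk : PySem.List.len (pvKey tokens L i) = L := by
    simp [PySem.List.len_eq, pvKey, PySem.List.length_pyRange_one]
    omega
  simp only [Function.comp]
  rw [hlenk]
  have hget : PySem.List.pyGetD (tokens.map pvRep) (i + L) ("", "")
      = pvRep (PySem.List.pyGetD tokens (i + L) []) := by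
    rw [PySem.List.pyGetD_eq_getElem (tokens.map pvRep) ("", "") (by omega) (by simp; omega),
        PySem.List.pyGetD_eq_getElem tokens [] (by omega) (by omega)]
    simp
  rw [hget]
  unfold pvKey
  rw [PySem.List.pyRange_one_succ_right h, List.map_append]
  simp

theorem dictpass_eq (tokens : List (List (String × String))) (L : Int)
    (d : PySem.Dict (List (String × String)) (List Int)) :
    (PySem.List.enumerate (pvW tokens L)).foldl
        (fun d p => PySem.Dict.modify d p.2 [] (fun v => v ++ [p.1])) d
      = (PySem.List.pyRange 0 (PySem.List.len tokens - L + 1) 1).foldl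
          (fun d i => PySem.Dict.modify d (pvKey tokens L i) [] (fun v => v ++ [i])) d := by
  rw [pvW, enumerate_map_pyRange, List.foldl_map]

theorem pvA_cons (tokens : List (List (String × String))) (a b : Int)
    (d : PySem.Dict (List (String × String)) (List Int)) (h : a < b) :
    pvA tokens a b d = pvA tokens (a + 1) b
      ((PySem.List.pyRange 0 (PySem.List.len tokens - a + 1) 1).foldl
        (fun d i => PySem.Dict.modify d (pvKey tokens a i) [] (fun v => v ++ [i])) d) := by
  unfold pvA
  rw [PySem.List.pyRange_one_cons h]
  rfl

theorem loop_eq (tokens : List (List (String × String))) (k : Nat) :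
    ∀ (a b : Int) (d : PySem.Dict (List (String × String)) (List Int)), 0 ≤ a → (b - a).toNat = k →
    ((PySem.List.pyRange a b 1).foldl
      (fun (st : PySem.Dict (List (String × String)) (List Int) × List (List (String × String))) _ =>
        let seqs := (PySem.List.enumerate st.2).foldl
            (fun d p => PySem.Dict.modify d p.2 [] (fun v => v ++ [p.1])) st.1
        let ws := (PySem.List.enumerate (PySem.List.slice st.2 none (some (-1)))).map
            (fun p => p.2 ++ [PySem.List.pyGetD (tokens.map pvRep) (p.1 + PySem.List.len p.2) ("", "")])
        (seqs, ws))
      (d, pvW tokens a)).1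
    = pvA tokens a b d := by
  induction k with
  | zero =>
    intro a b d _ hk
    unfold pvA
    rw [PySem.List.pyRange_one_eq_nil (by omega)]
    rfl
  | succ k ih =>
    intro a b d ha hk
    rw [PySem.List.pyRange_one_cons (show a < b by omega)]
    simp only [List.foldl_cons]
    rw [dictpass_eq, extension_eq tokens a ha, pvA_cons tokens a b d (by omega)]
    exact ih (a + 1) b _ (by omega) (by omega)

theorem pvA_no_window (tokens : List (List (String × String))) :
    ∀ (l : List Int) (d : PySem.Dict (List (String × String)) (List Int)),
      (∀ L ∈ l, PySem.List.len tokens - L + 1 ≤ 0) →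
      l.foldl (fun d L =>
        (PySem.List.pyRange 0 (PySem.List.len tokens - L + 1) 1).foldl
          (fun d i => PySem.Dict.modify d (pvKey tokens L i) [] (fun v => v ++ [i])) d) d = d := by
  intro l
  induction l with
  | nil => intro d _; rfl
  | cons L t ih =>
    intro d h
    simp only [List.foldl_cons]
    rw [PySem.List.pyRange_one_eq_nil (h L (by simp))]
    exact ih d (fun L' hL' => h L' (by simp [hL']))

theorem portB_eq_pvA (tokens : List (List (String × String))) (min_length max_length : Int) (h : 0 ≤ min_length) :
    extract_token_sequences_alt tokens min_length max_length
      = (pvA tokens min_length (max_length + 1) PySem.Dict.empty).items := by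
  unfold extract_token_sequences_alt
  dsimp only
  by_cases hg : min_length > max_length ∨ min_length > PySem.List.len tokens
  · rw [if_pos hg]
    unfold pvA
    rw [pvA_no_window tokens _ PySem.Dict.empty ?_]
    intro L hL
    rw [PySem.List.mem_pyRange_one] at hL
    rcases hg with hg | hg
    · omega
    · omega
  · rw [if_neg hg]
    rw [windows0_eq tokens min_length h]
    exact congrArg PySem.Dict.items
      (loop_eq tokens (max_length + 1 - min_length).toNat min_length (max_length + 1)
        PySem.Dict.empty h rfl)

-- ===== VERDICT (by name: the statement is the Claim_ definition above) =====
theorem extract_token_sequences_spec : Claim_equal_extract_token_sequences := by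
  intro tokens min_length max_length _ hpre
  unfold Spec_extract_token_sequences
  rw [portA_eq_pvA, portB_eq_pvA tokens min_length max_length hpre.1]
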